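-- pv_equiv track=rewrite | github.com/UncleEngineer/PythonCalculus | IntegralUncleEngineer.py | pownumber
-- ===== SOURCE A (Python) =====
-- def pownumber(rs):
--     resulttext = ['','']
--     for i in rs:
--         if resulttext[-2] == '*' and resulttext[-1] == '*' and i == '2':
--             resulttext.append('²')
--         elif resulttext[-2] == '*' and resulttext[-1] == '*' and i == '3':
--             resulttext.append('³')
--         elif resulttext[-2] == '*' and resulttext[-1] == '*' and i == '4':
--             resulttext.append('⁴')
--         elif resulttext[-2] == '*' and resulttext[-1] == '*' and i == '5':
--             resulttext.append('⁵')
--         elif resulttext[-2] == '*' and resulttext[-1] == '*' and i == '6':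
--             resulttext.append('⁶')
--         elif resulttext[-2] == '*' and resulttext[-1] == '*' and i == '7':
--             resulttext.append('⁷')
--         elif resulttext[-2] == '*' and resulttext[-1] == '*' and i == '8':
--             resulttext.append('⁸')
--         elif resulttext[-2] == '*' and resulttext[-1] == '*' and i == '9':
--             resulttext.append('⁹')
--         else:
--             resulttext.append(i)
--     resulttext.remove('')
--     resulttext.remove('')
--
--     finaltext = ''
--
--     for j in resulttext:
--         if j != '*':
--             finaltext += j
--         else:
--             finaltext = finaltext
--
--     return finaltext
-- ===== SOURCE B (Python) =====
-- SUP = {'2': '\u00b2', '3': '\u00b3', '4': '\u2074', '5': '\u2075',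
--        '6': '\u2076', '7': '\u2077', '8': '\u2078', '9': '\u2079'}
--
-- def pownumber(rs):
--     out = []
--     prev2 = prev1 = ''
--     for ch in rs:
--         if prev2 == '*' and prev1 == '*' and ch in SUP:
--             out.append(SUP[ch])
--         elif ch != '*':
--             out.append(ch)
--         prev2, prev1 = prev1, ch
--     return ''.join(out)
-- ===== Notes on version B (the rewrite author's own statement) =====
-- stated objective: simpler
-- what changed: B replaces A's growing list with empty-string sentinels, negative indexing, two remove calls and a second stripping pass by a single pass that tracks the two previous input characters in scalars, looks digits up in a dict, and never emits the asterisk.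
import Mathlib
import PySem

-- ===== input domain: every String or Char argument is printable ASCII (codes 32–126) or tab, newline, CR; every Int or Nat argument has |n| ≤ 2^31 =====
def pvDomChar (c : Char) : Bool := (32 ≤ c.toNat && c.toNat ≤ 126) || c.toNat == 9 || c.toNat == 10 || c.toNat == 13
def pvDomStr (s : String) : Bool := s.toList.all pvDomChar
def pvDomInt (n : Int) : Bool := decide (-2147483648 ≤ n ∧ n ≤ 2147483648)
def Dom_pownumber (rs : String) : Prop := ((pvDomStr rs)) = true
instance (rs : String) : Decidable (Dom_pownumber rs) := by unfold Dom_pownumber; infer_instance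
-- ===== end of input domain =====

-- B replaces A's growing list with two scalar previous-character trackers and a single
-- pass that never emits '*', removing the sentinel bookkeeping and the second stripping pass (objective: simpler).

-- ===== PORT A =====
-- one step of A's first loop; resulttext[-2]/[-1] via pyGet? (the list always has ≥ 2 elements, so it never raises)
def supStep (rt : List String) (i : Char) : List String :=
  if PySem.List.pyGet? rt (-2) == some "*" && PySem.List.pyGet? rt (-1) == some "*" && i == '2' then rt ++ ["²"]
  else if PySem.List.pyGet? rt (-2) == some "*" && PySem.List.pyGet? rt (-1) == some "*" && i == '3' then rt ++ ["³"]
  else if PySem.List.pyGet? rt (-2) == some "*" && PySem.List.pyGet? rt (-1) == some "*" && i == '4' then rt ++ ["⁴"]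
  else if PySem.List.pyGet? rt (-2) == some "*" && PySem.List.pyGet? rt (-1) == some "*" && i == '5' then rt ++ ["⁵"]
  else if PySem.List.pyGet? rt (-2) == some "*" && PySem.List.pyGet? rt (-1) == some "*" && i == '6' then rt ++ ["⁶"]
  else if PySem.List.pyGet? rt (-2) == some "*" && PySem.List.pyGet? rt (-1) == some "*" && i == '7' then rt ++ ["⁷"]
  else if PySem.List.pyGet? rt (-2) == some "*" && PySem.List.pyGet? rt (-1) == some "*" && i == '8' then rt ++ ["⁸"]
  else if PySem.List.pyGet? rt (-2) == some "*" && PySem.List.pyGet? rt (-1) == some "*" && i == '9' then rt ++ ["⁹"]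
  else rt ++ [String.ofList [i]]

def pownumber (rs : String) : String :=
  let rt := rs.toList.foldl supStep ["", ""]
  -- resulttext.remove('') twice: never raises, the two '' sentinels are always present (getD [] unreachable)
  let rt1 := (PySem.List.remove? rt "").getD []
  let rt2 := (PySem.List.remove? rt1 "").getD []
  rt2.foldl (fun ft j => if j != "*" then ft ++ j else ft) ""

-- ===== PORT B =====
-- the SUP dict of Source B as a function '2'..'9' → superscript; 'ch in SUP' = (sup? ch).isSome, 'SUP[ch]' = (sup? ch).getD ch
def sup? (c : Char) : Option Char :=
  if c == '2' then some '²' else if c == '3' then some '³' else if c == '4' then some '⁴'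
  else if c == '5' then some '⁵' else if c == '6' then some '⁶' else if c == '7' then some '⁷'
  else if c == '8' then some '⁸' else if c == '9' then some '⁹' else none

-- one step of B's single loop; the '' sentinels of prev2/prev1 are Option.none
def altStep (st : Option Char × Option Char × List Char) (ch : Char) :
    Option Char × Option Char × List Char :=
  let out :=
    if st.1 == some '*' && st.2.1 == some '*' && (sup? ch).isSome then st.2.2 ++ [(sup? ch).getD ch]
    else if ch != '*' then st.2.2 ++ [ch] else st.2.2
  (st.2.1, some ch, out)

def pownumber_alt (rs : String) : String :=
  String.ofList (rs.toList.foldl altStep (none, none, [])).2.2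

-- ===== PRECONDITION & SPEC =====
def Spec_pownumber (rs : String) (out : String) : Prop := out = pownumber_alt rs
instance (rs : String) (out : String) : Decidable (Spec_pownumber rs out) := by unfold Spec_pownumber; infer_instance

-- ===== CLAIM (what is proved, stated in full; the proofs are below) =====
def Claim_equal_pownumber : Prop := ∀ (rs : String), Dom_pownumber rs → Spec_pownumber rs (pownumber rs)

-- ===== LEMMAS AND PROOFS =====

-- common skeleton: the characters emitted from the remaining input given the two previous input chars
def go : List Char → Option Char → Option Char → List Char
  | [], _, _ => []
  | c :: cs, p2, p1 =>
    (if p2 == some '*' && p1 == some '*' && (sup? c).isSome then [(sup? c).getD c]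
     else if c != '*' then [c] else []) ++ go cs p1 (some c)

-- the strings A's first loop appends, given the two previous input chars
def goA : List Char → Option Char → Option Char → List String
  | [], _, _ => []
  | c :: cs, p2, p1 =>
    (if p2 == some '*' && p1 == some '*' && (sup? c).isSome then String.ofList [(sup? c).getD c]
     else String.ofList [c]) :: goA cs p1 (some c)

theorem alt_fold (cs : List Char) : ∀ (p2 p1 : Option Char) (out : List Char),
    (cs.foldl altStep (p2, p1, out)).2.2 = out ++ go cs p2 p1 := by
  induction cs with
  | nil => intro p2 p1 out; simp [go]
  | cons c cs ih =>
    intro p2 p1 out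
    simp only [List.foldl_cons, altStep, go]
    by_cases h : (p2 == some '*' && p1 == some '*' && (sup? c).isSome) = true
    · simp [h, ih]
    · by_cases hc : (c != '*') = true <;> simp [h, hc, ih]

theorem pyGet?_append_neg_two (xs : List String) (x : String) (h : xs ≠ []) :
    PySem.List.pyGet? (xs ++ [x]) (-2) = PySem.List.pyGet? xs (-1) := by
  have hl : 0 < xs.length := List.length_pos_iff.mpr h
  rw [PySem.List.pyGet?_neg_ofNat _ 2 (by omega) (by simp; omega),
      PySem.List.pyGet?_neg_ofNat _ 1 (by omega) (by omega)]
  simp only [List.length_append, List.length_cons, List.length_nil]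
  rw [List.getElem?_append_left (by omega)]
  congr 1 <;> omega

theorem singleton_beq_star (c : Char) : (String.ofList [c] == "*") = (c == '*') := by
  by_cases h : c = '*'
  · subst h; decide
  · simp [h, String.ext_iff]

theorem sup?_ne_star {c s : Char} (h : sup? c = some s) : s ≠ '*' ∧ c ≠ '*' := by
  unfold sup? at h
  split_ifs at h <;> simp_all <;> simp [← h]

theorem a_fold (cs : List Char) : ∀ (rt : List String) (p2 p1 : Option Char),
    rt ≠ [] →
    (PySem.List.pyGet? rt (-1) == some "*") = (p1 == some '*') →
    (PySem.List.pyGet? rt (-2) == some "*") = (p2 == some '*') →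
    cs.foldl supStep rt = rt ++ goA cs p2 p1 := by
  induction cs with
  | nil => intro rt p2 p1 _ _ _; simp [goA]
  | cons c cs ih =>
    intro rt p2 p1 hne h1 h2
    have hstep : supStep rt c =
        rt ++ [if p2 == some '*' && p1 == some '*' && (sup? c).isSome
               then String.ofList [(sup? c).getD c] else String.ofList [c]] := by
      unfold supStep
      rw [h1, h2]
      by_cases hs : (p2 == some '*' && p1 == some '*') = true
      · by_cases h2' : c = '2'; · simp [hs, h2', sup?]
        by_cases h3 : c = '3'; · simp [hs, h3, sup?]
        by_cases h4 : c = '4'; · simp [hs, h4, sup?]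
        by_cases h5 : c = '5'; · simp [hs, h5, sup?]
        by_cases h6 : c = '6'; · simp [hs, h6, sup?]
        by_cases h7 : c = '7'; · simp [hs, h7, sup?]
        by_cases h8 : c = '8'; · simp [hs, h8, sup?]
        by_cases h9 : c = '9'; · simp [hs, h9, sup?]
        simp [hs, h2', h3, h4, h5, h6, h7, h8, h9, sup?]
      · simp only [Bool.and_eq_true] at hs
        rcases (not_and_or.mp hs) with h | h <;> simp_all
    set e : String := if p2 == some '*' && p1 == some '*' && (sup? c).isSome
        then String.ofList [(sup? c).getD c] else String.ofList [c] with he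
    have hbeq : (e == "*") = (c == '*') := by
      rw [he]
      by_cases hb : (p2 == some '*' && p1 == some '*' && (sup? c).isSome) = true
      · simp only [hb, if_true]
        simp only [Bool.and_eq_true, Option.isSome_iff_exists] at hb
        obtain ⟨_, s, hs⟩ := hb
        obtain ⟨hl, hr⟩ := sup?_ne_star hs
        simp [hs, String.ext_iff, hl, hr]
      · simp [hb, singleton_beq_star]
    have h1' : (PySem.List.pyGet? (rt ++ [e]) (-1) == some "*") = (some c == some '*') := by
      rw [PySem.List.pyGet?_neg_one_append_singleton]
      simpa using hbeq
    have h2' : (PySem.List.pyGet? (rt ++ [e]) (-2) == some "*") = (p1 == some '*') := by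
      rw [pyGet?_append_neg_two _ _ hne]; exact h1
    calc (c :: cs).foldl supStep rt = cs.foldl supStep (rt ++ [e]) := by
          simp [hstep]
      _ = (rt ++ [e]) ++ goA cs p1 (some c) := ih _ _ _ (by simp) h1' h2'
      _ = rt ++ goA (c :: cs) p2 p1 := by simp [goA, he]

theorem goA_join (cs : List Char) : ∀ (p2 p1 : Option Char) (acc : String),
    (goA cs p2 p1).foldl (fun ft j => if j != "*" then ft ++ j else ft) acc
      = acc ++ String.ofList (go cs p2 p1) := by
  induction cs with
  | nil => intro p2 p1 acc; simp [goA, go]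
  | cons c cs ih =>
    intro p2 p1 acc
    simp only [goA, go, List.foldl_cons]
    rw [ih]
    by_cases hb : (p2 == some '*' && p1 == some '*' && (sup? c).isSome) = true
    · have hb' := hb
      simp only [Bool.and_eq_true, Option.isSome_iff_exists] at hb'
      obtain ⟨⟨hp2, hp1⟩, s, hs⟩ := hb'
      obtain ⟨hss, hcs⟩ := sup?_ne_star hs
      have hp2' : p2 = some '*' := by simpa using hp2
      have hp1' : p1 = some '*' := by simpa using hp1
      simp [hp2', hp1', hs, hss, hcs, String.ext_iff]
    · by_cases hc : c = '*'
      · subst hc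
        simp [hb, sup?, String.ext_iff]
      · simp [hb, hc, String.ext_iff]

-- ===== VERDICT (by name: the statement is the Claim_ definition above) =====
theorem pownumber_spec : Claim_equal_pownumber := by
  intro rs _
  unfold Spec_pownumber pownumber pownumber_alt
  rw [a_fold rs.toList ["", ""] none none (by simp) (by decide) (by decide)]
  rw [alt_fold rs.toList none none []]
  have h1 : PySem.List.remove? ("" :: "" :: goA rs.toList none none) "" =
      some ("" :: goA rs.toList none none) := PySem.List.remove?_cons_self _ _
  simp only [List.cons_append, List.nil_append, h1, Option.getD_some,
    PySem.List.remove?_cons_self]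
  rw [goA_join rs.toList none none ""]
  simp [String.ext_iff]
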